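-- pv_equiv track=rewrite | github.com/anjrew/deepracer-for-cloud | scripts/validation/validate_model_metadata_json_functions.py | check_sensor_property
-- ===== SOURCE A (Python) =====
-- from typing import Dict, List
-- from xmlrpc.client import Boolean
--
-- def check_sensor_property(test: List) -> Boolean:
--     """Checks the sesor property of a model metadata file
--
--     Args:
--         test (List(str)): The list of sensor values to check
--
--     Returns:
--         Boolean: True if it is valid and false if it is not
--     """
--
--     cameras = ["FRONT_FACING_CAMERA", "STEREO_CAMERAS"]
--     options = ["LIDAR"] + cameras
--     are_valid_sensors = all([
--         any([o == s for o in options]) for s in test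
--     ])
--
--     cameras_found = [x in test for x in cameras]
--     only_one_camera = cameras_found.count(True) == 1
--     return are_valid_sensors and only_one_camera
-- ===== SOURCE B (Python) =====
-- def check_sensor_property(test):
--     """Single-pass re-implementation: one loop tracking validity and the
--     distinct camera types seen."""
--     cameras = ["FRONT_FACING_CAMERA", "STEREO_CAMERAS"]
--     valid = True
--     seen = []
--     for s in test:
--         if s not in cameras and s != "LIDAR":
--             valid = False
--         elif s in cameras and s not in seen:
--             seen.append(s)
--     return valid and len(seen) == 1
-- ===== Notes on version B (the rewrite author's own statement) =====
-- stated objective: alternative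
-- what changed: Replaces A's three passes (build a list of per-element any-comparisons for all(), then scan test once per camera and count) with a single loop over test maintaining a validity flag and the list of distinct camera types seen.
import Mathlib
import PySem

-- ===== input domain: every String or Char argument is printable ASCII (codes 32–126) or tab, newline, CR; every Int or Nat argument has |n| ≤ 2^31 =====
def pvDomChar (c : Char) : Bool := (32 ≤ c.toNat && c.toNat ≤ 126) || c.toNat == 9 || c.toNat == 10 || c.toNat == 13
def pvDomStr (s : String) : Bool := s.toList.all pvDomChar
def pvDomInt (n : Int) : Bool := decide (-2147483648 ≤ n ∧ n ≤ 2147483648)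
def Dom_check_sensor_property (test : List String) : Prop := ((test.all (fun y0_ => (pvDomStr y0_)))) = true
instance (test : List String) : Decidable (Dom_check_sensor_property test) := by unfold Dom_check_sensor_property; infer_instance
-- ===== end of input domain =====

-- B is an alternative single-pass implementation (validity flag + distinct cameras seen); same cost.

-- ===== PORT A =====
def check_sensor_property (test : List String) : Bool :=
  let cameras : List String := ["FRONT_FACING_CAMERA", "STEREO_CAMERAS"]
  let options : List String := ["LIDAR"] ++ cameras
  let are_valid_sensors := (test.map (fun s => (options.map (fun o => o == s)).any id)).all id
  let cameras_found := cameras.map (fun x => test.contains x)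
  let only_one_camera := cameras_found.count true == 1
  are_valid_sensors && only_one_camera

-- ===== PORT B =====
def bCameras : List String := ["FRONT_FACING_CAMERA", "STEREO_CAMERAS"]

def bStep (p : Bool × List String) (s : String) : Bool × List String :=
  if !(bCameras.contains s) && s != "LIDAR" then (false, p.2)
  else if bCameras.contains s && !(p.2.contains s) then (p.1, p.2 ++ [s])
  else p

def check_sensor_property_alt (test : List String) : Bool :=
  let st := test.foldl bStep (true, [])
  st.1 && (st.2.length == 1)

-- ===== PRECONDITION & SPEC =====
def Spec_check_sensor_property (test : List String) (out : Bool) : Prop := out = check_sensor_property_alt test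
instance (test : List String) (out : Bool) : Decidable (Spec_check_sensor_property test out) := by unfold Spec_check_sensor_property; infer_instance

-- ===== CLAIM (what is proved, stated in full; the proofs are below) =====
def Claim_equal_check_sensor_property : Prop := ∀ (test : List String), Dom_check_sensor_property test → Spec_check_sensor_property test (check_sensor_property test)

-- ===== LEMMAS AND PROOFS =====

theorem bStep_eq (p : Bool × List String) (s : String) :
    bStep p s = if s ∈ bCameras then (if s ∈ p.2 then p else (p.1, p.2 ++ [s]))
                else if s = "LIDAR" then p else (false, p.2) := by
  unfold bStep
  by_cases hc : s ∈ bCameras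
  · by_cases hs : s ∈ p.2 <;> simp [hc, hs, List.contains_iff_mem]
  · by_cases hl : s = "LIDAR"
    · subst hl; simp [bCameras, List.contains_iff_mem]
    · simp [hc, hl, List.contains_iff_mem]

theorem bFst (l : List String) : ∀ (v : Bool) (seen : List String),
    (l.foldl bStep (v, seen)).1 = (v && l.all (fun s => bCameras.contains s || s == "LIDAR")) := by
  induction l with
  | nil => intro v seen; simp
  | cons s t ih =>
    intro v seen
    simp only [List.foldl_cons, List.all_cons, bStep_eq]
    by_cases hc : s ∈ bCameras
    · by_cases hs : s ∈ seen <;>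
        simp [hc, hs, ih, List.contains_iff_mem, Bool.and_assoc]
    · by_cases hl : s = "LIDAR"
      · subst hl; simp [bCameras, ih, List.contains_iff_mem, Bool.and_assoc]
      · simp [hc, hl, ih, List.contains_iff_mem, Bool.and_assoc]

theorem bMem (l : List String) : ∀ (v : Bool) (seen : List String) (x : String),
    x ∈ (l.foldl bStep (v, seen)).2 ↔ x ∈ seen ∨ (x ∈ bCameras ∧ x ∈ l) := by
  induction l with
  | nil => intro v seen x; simp
  | cons s t ih =>
    intro v seen x
    simp only [List.foldl_cons, bStep_eq]
    by_cases hc : s ∈ bCameras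
    · by_cases hs : s ∈ seen
      · simp only [hc, hs, if_true, ih, List.mem_cons]
        constructor
        · rintro (h | ⟨hx, hxl⟩)
          · exact Or.inl h
          · exact Or.inr ⟨hx, Or.inr hxl⟩
        · rintro (h | ⟨hx, rfl | hxl⟩)
          · exact Or.inl h
          · exact Or.inl hs
          · exact Or.inr ⟨hx, hxl⟩
      · simp only [hc, hs, if_true, if_false, ih, List.mem_cons, List.mem_append,
          List.not_mem_nil, or_false]
        constructor
        · rintro ((h | rfl) | ⟨hx, hxl⟩)
          · exact Or.inl h
          · exact Or.inr ⟨hc, Or.inl rfl⟩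
          · exact Or.inr ⟨hx, Or.inr hxl⟩
        · rintro (h | ⟨hx, rfl | hxl⟩)
          · exact Or.inl (Or.inl h)
          · exact Or.inl (Or.inr rfl)
          · exact Or.inr ⟨hx, hxl⟩
    · by_cases hl : s = "LIDAR"
      · subst hl
        have hnc : "LIDAR" ∉ bCameras := by decide
        simp only [hnc, if_false, if_true, ih, List.mem_cons]
        constructor
        · rintro (h | ⟨hx, hxl⟩)
          · exact Or.inl h
          · exact Or.inr ⟨hx, Or.inr hxl⟩
        · rintro (h | ⟨hx, rfl | hxl⟩)
          · exact Or.inl h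
          · exact absurd hx hnc
          · exact Or.inr ⟨hx, hxl⟩
      · simp only [hc, hl, if_false, ih, List.mem_cons]
        constructor
        · rintro (h | ⟨hx, hxl⟩)
          · exact Or.inl h
          · exact Or.inr ⟨hx, Or.inr hxl⟩
        · rintro (h | ⟨hx, rfl | hxl⟩)
          · exact Or.inl h
          · exact absurd hx hc
          · exact Or.inr ⟨hx, hxl⟩

theorem bNodup (l : List String) : ∀ (v : Bool) (seen : List String), seen.Nodup →
    (l.foldl bStep (v, seen)).2.Nodup := by
  induction l with
  | nil => intro v seen h; simpa
  | cons s t ih =>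
    intro v seen h
    simp only [List.foldl_cons, bStep_eq]
    by_cases hc : s ∈ bCameras
    · by_cases hs : s ∈ seen
      · simp only [hc, hs, if_true]; exact ih _ _ h
      · simp only [hc, hs, if_true, if_false]
        refine ih _ _ ?_
        rw [List.nodup_append]
        refine ⟨h, List.nodup_singleton s, ?_⟩
        intro a ha b hb
        rw [List.mem_singleton] at hb
        exact fun he => hs ((he.trans hb) ▸ ha)
    · by_cases hl : s = "LIDAR"
      · subst hl
        have hnc : "LIDAR" ∉ bCameras := by decide
        simp only [hnc, if_false, if_true]
        exact ih _ _ h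
      · simp only [hc, hl, if_false]
        exact ih _ _ h

-- a nodup list whose elements lie in the two-element camera list has length = number of cameras present
theorem twoLen (L : List String) (hn : L.Nodup) (hsub : ∀ x ∈ L, x ∈ bCameras) :
    L.length = (if "FRONT_FACING_CAMERA" ∈ L then 1 else 0) + (if "STEREO_CAMERAS" ∈ L then 1 else 0) := by
  induction L with
  | nil => simp
  | cons a L' ih =>
    have ha := hsub a (List.mem_cons_self ..)
    have hna := (List.nodup_cons.mp hn).1
    have hrec := ih (List.nodup_cons.mp hn).2 (fun x hx => hsub x (List.mem_cons_of_mem _ hx))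
    simp only [bCameras, List.mem_cons, List.not_mem_nil, or_false] at ha
    rcases ha with rfl | rfl <;>
      · simp only [List.length_cons, List.mem_cons, hrec]
        split_ifs <;> simp_all

theorem check_sensor_property_spec : Claim_equal_check_sensor_property := by
  intro test _
  unfold Spec_check_sensor_property check_sensor_property check_sensor_property_alt
  have hfst := bFst test true []
  have hnd := bNodup test true [] List.nodup_nil
  have hlen : (test.foldl bStep (true, [])).2.length =
      (if "FRONT_FACING_CAMERA" ∈ test then 1 else 0) +
      (if "STEREO_CAMERAS" ∈ test then 1 else 0) := by
    rw [twoLen _ hnd (fun x hx => ((bMem test true [] x).mp hx).elim (by simp) (fun h => h.1))]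
    simp [bMem, bCameras]
  have pointEq : ∀ s : String, ((["LIDAR"] ++ ["FRONT_FACING_CAMERA", "STEREO_CAMERAS"]).map
      (fun o => o == s)).any id = (bCameras.contains s || s == "LIDAR") := by
    intro s
    by_cases h1 : s = "LIDAR"
    · subst h1; decide
    by_cases h2 : s = "FRONT_FACING_CAMERA"
    · subst h2; decide
    by_cases h3 : s = "STEREO_CAMERAS"
    · subst h3; decide
    · have e1 : (s == "LIDAR") = false := beq_eq_false_iff_ne.mpr h1
      have e1' : ("LIDAR" == s) = false := beq_eq_false_iff_ne.mpr (Ne.symm h1)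
      have e2 : ("FRONT_FACING_CAMERA" == s) = false := beq_eq_false_iff_ne.mpr (Ne.symm h2)
      have e3 : ("STEREO_CAMERAS" == s) = false := beq_eq_false_iff_ne.mpr (Ne.symm h3)
      simp [bCameras, List.contains_iff_mem, h1, h2, h3, e1, e1', e2, e3]
  have hvalid : ∀ l : List String, (l.map (fun s => ((["LIDAR"] ++ ["FRONT_FACING_CAMERA",
      "STEREO_CAMERAS"]).map (fun o => o == s)).any id)).all id
      = l.all (fun s => bCameras.contains s || s == "LIDAR") := by
    intro l
    induction l with
    | nil => simp
    | cons s t ih =>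
        simp only [List.map_cons, List.all_cons, id_eq]
        rw [ih, pointEq s]
  simp only [hvalid test, hfst, Bool.true_and]
  congr 1
  by_cases hF : "FRONT_FACING_CAMERA" ∈ test <;> by_cases hS : "STEREO_CAMERAS" ∈ test <;>
    simp [List.count_cons, List.contains_iff_mem, hF, hS, hlen]
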